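-- pv_equiv track=rewrite | github.com/zbir84/advent_of_code | src/advent_of_code/y_2024/day_15/puzzle.py | move_box_horizontal
-- ===== SOURCE A (Python) =====
-- def move_box_horizontal(
--     ware: list[list[str]], move_dir: tuple[int, int], pos: tuple[int, int]
-- ) -> tuple[list[list[str]], bool]:
--     next_pos = (pos[0] + move_dir[0], pos[1] + move_dir[1])
--     moved = False
--     if ware[next_pos[0]][next_pos[1]] in ["[", "]"]:
--         # If the next position is also a box, try moving it and if succesful move current box as well
--         ware, moved = move_box_horizontal(ware, move_dir, next_pos)
--         if moved:
--             ware, moved = move_box_horizontal(ware, move_dir, pos)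
--     elif ware[next_pos[0]][next_pos[1]] == ".":
--         # Empty space, so now can actually move the box
--         box_side = ware[pos[0]][pos[1]]
--         ware[next_pos[0]][next_pos[1]] = box_side
--         ware[pos[0]][pos[1]] = "."
--         moved = True
--     return ware, moved
-- ===== SOURCE B (Python) =====
-- def move_box_horizontal(
--     ware: list[list[str]], move_dir: tuple[int, int], pos: tuple[int, int]
-- ) -> tuple[list[list[str]], bool]:
--     dr, dc = move_dir
--     r, c = pos[0] + dr, pos[1] + dc
--     # forward scan: walk past the run of box halves
--     while ware[r][c] in ("[", "]"):
--         r, c = r + dr, c + dc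
--     if ware[r][c] != ".":
--         return ware, False
--     # shift the whole run one step toward the free cell, far end first
--     pr, pc = pos
--     while (r, c) != (pr, pc):
--         ware[r][c] = ware[r - dr][c - dc]
--         r, c = r - dr, c - dc
--     ware[pr][pc] = "."
--     return ware, True
-- ===== Notes on version B (the rewrite author's own statement) =====
-- stated objective: alternative
-- what changed: Replaces A's double recursion (try to move the next box, then retry the current one) by a single iterative forward scan past the run of box halves followed by one backward shifting loop; equivalence is proved on exactly the inputs where A returns (Pre_ excludes the index-error and infinite-recursion inputs on which A raises).
import Mathlib
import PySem

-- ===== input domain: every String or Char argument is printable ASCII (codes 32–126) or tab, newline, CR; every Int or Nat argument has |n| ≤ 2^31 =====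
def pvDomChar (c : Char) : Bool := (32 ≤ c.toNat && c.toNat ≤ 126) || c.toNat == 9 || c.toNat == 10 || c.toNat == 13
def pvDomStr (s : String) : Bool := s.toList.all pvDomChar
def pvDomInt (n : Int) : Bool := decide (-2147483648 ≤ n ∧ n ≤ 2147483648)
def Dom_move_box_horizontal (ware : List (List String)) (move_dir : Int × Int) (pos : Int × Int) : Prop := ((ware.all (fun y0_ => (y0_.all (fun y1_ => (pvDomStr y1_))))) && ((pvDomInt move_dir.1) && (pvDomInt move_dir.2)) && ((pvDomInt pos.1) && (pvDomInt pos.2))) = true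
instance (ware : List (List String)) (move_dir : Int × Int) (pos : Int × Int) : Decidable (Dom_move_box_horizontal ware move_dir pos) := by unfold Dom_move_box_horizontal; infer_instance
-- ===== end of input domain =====

-- B replaces A's double recursion by one forward scan over the box run plus one backward shifting loop (alternative decomposition, same cost class); equivalence is proved on exactly the inputs where the Python A returns normally.


-- ===== PORT A =====
-- shared indexing helpers: ware[r][c] read / write with Python's index semantics (negative wraps, out of range = IndexError = none / no-op; the no-op write is never reached under Pre_)
def pvCell (w : List (List String)) (r c : Int) : Option String :=
  (PySem.List.pyGet? w r).bind fun row => PySem.List.pyGet? row c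

def pvSetCell (w : List (List String)) (r c : Int) (v : String) : List (List String) :=
  match PySem.List.pyGet? w r with
  | none => w
  | some row =>
    match PySem.List.pySet? row c v with
    | none => w
    | some row' => (PySem.List.pySet? w r row').getD w

-- an upper bound on the length of any readable box run, and the fuel both ports run with
def pvBound (w : List (List String)) : Nat := 2 * w.length + 2 * (w.map List.length).sum + 2
def pvFuel (w : List (List String)) : Nat := 2 * pvBound w + 4

-- literal port of A's recursion; fuel only makes it total (never exhausted under Pre_)
def pvMbhA : Nat → List (List String) → Int × Int → Int × Int → List (List String) × Bool
  | 0, ware, _, _ => (ware, false)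
  | fuel+1, ware, d, p =>
    let np : Int × Int := (p.1 + d.1, p.2 + d.2)
    match pvCell ware np.1 np.2 with
    | none => (ware, false)          -- Python raises IndexError here: outside Pre_
    | some s =>
      if s = "[" ∨ s = "]" then
        let res := pvMbhA fuel ware d np
        if res.2 then pvMbhA fuel res.1 d p else res
      else if s = "." then
        match pvCell ware p.1 p.2 with
        | none => (ware, false)      -- Python raises IndexError here: outside Pre_
        | some bs => (pvSetCell (pvSetCell ware np.1 np.2 bs) p.1 p.2 ".", true)
      else (ware, false)

def move_box_horizontal (ware : List (List String)) (move_dir : Int × Int) (pos : Int × Int) : List (List String) × Bool :=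
  pvMbhA (pvFuel ware) ware move_dir pos

-- ===== PORT B =====
-- forward scan: `while ware[r][c] in ("[", "]"): r, c = r + dr, c + dc`
def pvScanB : Nat → List (List String) → Int × Int → Int → Int → Int × Int
  | 0, _, _, r, c => (r, c)
  | fuel+1, ware, d, r, c =>
    match pvCell ware r c with
    | some s => if s = "[" ∨ s = "]" then pvScanB fuel ware d (r + d.1) (c + d.2) else (r, c)
    | none => (r, c)                 -- Python raises IndexError here: outside Pre_
-- backward shift: `while (r, c) != (pr, pc): ware[r][c] = ware[r-dr][c-dc]; r, c = r-dr, c-dc`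
def pvShiftB : Nat → List (List String) → Int × Int → Int → Int → Int → Int → List (List String)
  | 0, ware, _, _, _, _, _ => ware
  | fuel+1, ware, d, r, c, pr, pc =>
    if r = pr ∧ c = pc then ware
    else pvShiftB fuel (pvSetCell ware r c ((pvCell ware (r - d.1) (c - d.2)).getD "")) d (r - d.1) (c - d.2) pr pc

def move_box_horizontal_alt (ware : List (List String)) (move_dir : Int × Int) (pos : Int × Int) : List (List String) × Bool :=
  let rc := pvScanB (pvFuel ware) ware move_dir (pos.1 + move_dir.1) (pos.2 + move_dir.2)
  match pvCell ware rc.1 rc.2 with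
  | none => (ware, false)
  | some s =>
    if s ≠ "." then (ware, false)
    else (pvSetCell (pvShiftB (pvFuel ware) ware move_dir rc.1 rc.2 pos.1 pos.2) pos.1 pos.2 ".", true)

-- ===== PRECONDITION & SPEC =====
def pvPos (p d : Int × Int) (j : Nat) : Int × Int := (p.1 + (j : Int) * d.1, p.2 + (j : Int) * d.2)

def pvBoxB (s : String) : Bool := s == "[" || s == "]"

-- "there is a box run of length k-1 starting next to pos, ending at a readable non-box cell; pos itself is readable if that cell is free"
def pvChainB (w : List (List String)) (d p : Int × Int) (k : Nat) : Bool :=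
  decide (1 ≤ k) &&
  ((List.range k).all fun j =>
    j == 0 ||
      ((pvCell w (pvPos p d j).1 (pvPos p d j).2).isSome &&
        pvBoxB ((pvCell w (pvPos p d j).1 (pvPos p d j).2).getD ""))) &&
  ((pvCell w (pvPos p d k).1 (pvPos p d k).2).isSome &&
    !pvBoxB ((pvCell w (pvPos p d k).1 (pvPos p d k).2).getD "") &&
    (!((pvCell w (pvPos p d k).1 (pvPos p d k).2).getD "" == ".") || (pvCell w p.1 p.2).isSome))

-- Pre_ holds exactly when the Python A returns normally: otherwise A raises IndexError (the scan runs off the grid) or recurses forever (zero direction into a box half); it excludes nothing on which A returns.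
def Pre_move_box_horizontal (ware : List (List String)) (move_dir : Int × Int) (pos : Int × Int) : Prop :=
  ∃ k ∈ Finset.range (pvBound ware + 1), pvChainB ware move_dir pos k = true
instance (ware : List (List String)) (move_dir : Int × Int) (pos : Int × Int) : Decidable (Pre_move_box_horizontal ware move_dir pos) := by unfold Pre_move_box_horizontal; infer_instance

def pvWitness_move_box_horizontal : List (List String) × (Int × Int) × (Int × Int) :=
  ([[".", "[", "]", "."]], ((0 : Int), (1 : Int)), ((0 : Int), (1 : Int)))

def Spec_move_box_horizontal (ware : List (List String)) (move_dir : Int × Int) (pos : Int × Int) (out : List (List String) × Bool) : Prop := out = move_box_horizontal_alt ware move_dir pos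
instance (ware : List (List String)) (move_dir : Int × Int) (pos : Int × Int) (out : List (List String) × Bool) : Decidable (Spec_move_box_horizontal ware move_dir pos out) := by unfold Spec_move_box_horizontal; infer_instance

-- ===== CLAIM (what is proved, stated in full; the proofs are below) =====
def Claim_equal_move_box_horizontal : Prop := ∀ (ware : List (List String)) (move_dir : Int × Int) (pos : Int × Int), Dom_move_box_horizontal ware move_dir pos → Pre_move_box_horizontal ware move_dir pos → Spec_move_box_horizontal ware move_dir pos (move_box_horizontal ware move_dir pos)

-- ===== LEMMAS AND PROOFS =====

-- row length as Python sees it (0 for an unreadable row index)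
def pvRowLen (w : List (List String)) (r : Int) : Nat := ((PySem.List.pyGet? w r).getD []).length

-- Prop form of pvChainB, used by all proofs
def pvChain (w : List (List String)) (d p : Int × Int) (k : Nat) : Prop :=
  1 ≤ k ∧
  (∀ j, j < k → 1 ≤ j → (pvCell w (pvPos p d j).1 (pvPos p d j).2).isSome = true ∧
      pvBoxB ((pvCell w (pvPos p d j).1 (pvPos p d j).2).getD "") = true) ∧
  (pvCell w (pvPos p d k).1 (pvPos p d k).2).isSome = true ∧
  pvBoxB ((pvCell w (pvPos p d k).1 (pvPos p d k).2).getD "") = false ∧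
  (((pvCell w (pvPos p d k).1 (pvPos p d k).2).getD "") = "." → (pvCell w p.1 p.2).isSome = true)

theorem pvChainB_iff (w : List (List String)) (d p : Int × Int) (k : Nat) :
    pvChainB w d p k = true ↔ pvChain w d p k := by
  unfold pvChainB pvChain
  simp only [Bool.and_eq_true, decide_eq_true_eq, List.all_eq_true, List.mem_range,
    Bool.or_eq_true, beq_iff_eq, Bool.not_eq_true', beq_eq_false_iff_ne, ne_eq]
  constructor
  · rintro ⟨⟨h1, h2⟩, ⟨h3, h4⟩, h5⟩
    refine ⟨h1, fun j hj hj1 => ?_, h3, h4, fun hdot => ?_⟩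
    · rcases h2 j hj with h | h
      · omega
      · exact h
    · tauto
  · rintro ⟨h1, h2, h3, h4, h5⟩
    refine ⟨⟨h1, fun j hj => ?_⟩, ⟨h3, h4⟩, ?_⟩
    · by_cases hj0 : j = 0
      · exact Or.inl hj0
      · exact Or.inr (h2 j hj (by omega))
    · by_cases hdot : (pvCell w (pvPos p d k).1 (pvPos p d k).2).getD "" = "."
      · exact Or.inr (h5 hdot)
      · exact Or.inl hdot
theorem pvPos_one (p d : Int × Int) : pvPos p d 1 = (p.1 + d.1, p.2 + d.2) := by
  simp [pvPos]

theorem pvPos_shift (p d : Int × Int) (j : Nat) : pvPos (pvPos p d 1) d j = pvPos p d (j + 1) := by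
  simp only [pvPos, Prod.mk.injEq]
  constructor <;> push_cast <;> ring

theorem pvPos_sub (p d : Int × Int) (j : Nat) :
    (pvPos p d (j + 1)).1 - d.1 = (pvPos p d j).1 ∧ (pvPos p d (j + 1)).2 - d.2 = (pvPos p d j).2 := by
  constructor <;> (simp only [pvPos]; push_cast; ring)

theorem pvPos_ne (p d : Int × Int) (j : Nat) (hj : 1 ≤ j) (hd : d ≠ (0, 0)) : pvPos p d j ≠ p := by
  intro hEq
  apply hd
  have h1 : p.1 + (j : Int) * d.1 = p.1 := congrArg Prod.fst hEq
  have h2 : p.2 + (j : Int) * d.2 = p.2 := congrArg Prod.snd hEq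
  have hj0 : (j : Int) ≠ 0 := by
    have hne : j ≠ 0 := by omega
    exact_mod_cast hne
  have hd1 : d.1 = 0 := by
    rcases mul_eq_zero.mp (show (j : Int) * d.1 = 0 by linarith) with h | h
    · exact absurd h hj0
    · exact h
  have hd2 : d.2 = 0 := by
    rcases mul_eq_zero.mp (show (j : Int) * d.2 = 0 by linarith) with h | h
    · exact absurd h hj0
    · exact h
  cases d
  simp_all

theorem pvPos_zero_dir (p : Int × Int) (j : Nat) : pvPos p ((0 : Int), (0 : Int)) j = p := by
  simp [pvPos]

theorem pvPos_zero (p d : Int × Int) : pvPos p d 0 = p := by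
  simp [pvPos]

theorem pvPos_one_fst (p d : Int × Int) : (pvPos p d 1).1 = p.1 + d.1 := by
  simp [pvPos]

theorem pvPos_one_snd (p d : Int × Int) : (pvPos p d 1).2 = p.2 + d.2 := by
  simp [pvPos]

theorem pvPos_ne' (q d : Int × Int) (j : Nat) (hj : 1 ≤ j) (hd : d ≠ (0, 0)) :
    ¬((pvPos q d j).1 = q.1 ∧ (pvPos q d j).2 = q.2) := by
  intro hEq
  exact pvPos_ne q d j hj hd (Prod.ext hEq.1 hEq.2)

theorem pvIdx_lt {n : Nat} {i : Int} {k : Nat} (h : PySem.List.pyIdx? n i = some k) : k < n := by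
  unfold PySem.List.pyIdx? at h
  split_ifs at h
  all_goals simp_all
  all_goals omega
theorem pvCell_eq (w : List (List String)) (r c : Int) :
    pvCell w r c = (PySem.List.pyIdx? w.length r).bind fun i =>
      (PySem.List.pyIdx? (w.getD i []).length c).map fun j => (w.getD i []).getD j "" := by
  unfold pvCell PySem.List.pyGet?
  cases hi : PySem.List.pyIdx? w.length r with
  | none => simp
  | some i =>
    have hlt := pvIdx_lt hi
    have hrow : w.getD i [] = w[i] := List.getD_eq_getElem w [] hlt
    simp only [Option.bind_some, List.getElem?_eq_getElem hlt, hrow]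
    cases hj : PySem.List.pyIdx? w[i].length c with
    | none => simp
    | some j =>
      have hjlt := pvIdx_lt hj
      simp [List.getElem?_eq_getElem hjlt]

theorem pvSetCell_eq (w : List (List String)) (r c : Int) (v : String) :
    pvSetCell w r c v =
      match PySem.List.pyIdx? w.length r with
      | none => w
      | some i =>
        match PySem.List.pyIdx? (w.getD i []).length c with
        | none => w
        | some j => w.set i ((w.getD i []).set j v) := by
  unfold pvSetCell PySem.List.pyGet? PySem.List.pySet?
  cases hi : PySem.List.pyIdx? w.length r with
  | none => simp
  | some i =>
    have hlt := pvIdx_lt hi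
    have hrow : w.getD i [] = w[i] := List.getD_eq_getElem w [] hlt
    simp only [Option.bind_some, List.getElem?_eq_getElem hlt, hrow]
    cases hj : PySem.List.pyIdx? w[i].length c with
    | none => simp
    | some j => simp

theorem pvRowLen_eq (w : List (List String)) (r : Int) :
    pvRowLen w r = match PySem.List.pyIdx? w.length r with
      | none => 0
      | some i => (w.getD i []).length := by
  unfold pvRowLen PySem.List.pyGet?
  cases hi : PySem.List.pyIdx? w.length r with
  | none => simp
  | some i =>
    have hlt := pvIdx_lt hi
    have hrow : w.getD i [] = w[i] := List.getD_eq_getElem w [] hlt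
    simp [List.getElem?_eq_getElem hlt]

theorem pvGetD_set {α : Type} (l : List α) (i i' : Nat) (x d : α) (hi : i < l.length) :
    (l.set i x).getD i' d = if i' = i then x else l.getD i' d := by
  by_cases h : i' = i
  · subst h
    simp [List.getD_eq_getElem?_getD, hi]
  · simp [List.getD_eq_getElem?_getD, Ne.symm h, h]

-- shape preservation
theorem length_pvSetCell (w : List (List String)) (r c : Int) (v : String) :
    (pvSetCell w r c v).length = w.length := by
  rw [pvSetCell_eq]
  rcases hi : PySem.List.pyIdx? w.length r with _ | i
  · rfl
  · dsimp only
    rcases hj : PySem.List.pyIdx? (w.getD i []).length c with _ | j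
    · rfl
    · dsimp only
      simp
theorem pvRowLen_pvSetCell (w : List (List String)) (r c : Int) (v : String) (r' : Int) :
    pvRowLen (pvSetCell w r c v) r' = pvRowLen w r' := by
  rw [pvSetCell_eq]
  rcases hi : PySem.List.pyIdx? w.length r with _ | i
  · rfl
  · dsimp only
    rcases hj : PySem.List.pyIdx? (w.getD i []).length c with _ | j
    · rfl
    · dsimp only
      have hilt := pvIdx_lt hi
      rw [pvRowLen_eq, pvRowLen_eq, List.length_set]
      rcases hi' : PySem.List.pyIdx? w.length r' with _ | i'
      · rfl
      · dsimp only
        rw [pvGetD_set w i i' ((w.getD i []).set j v) [] hilt]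
        by_cases hii : i' = i
        · rw [if_pos hii, hii]
          simp
        · rw [if_neg hii]
theorem pvCell_pvSetCell (w : List (List String)) (r c : Int) (v : String) (r' c' : Int)
    (h : (pvCell w r c).isSome = true) :
    pvCell (pvSetCell w r c v) r' c' =
      if PySem.List.pyIdx? w.length r' = PySem.List.pyIdx? w.length r ∧
         PySem.List.pyIdx? (pvRowLen w r) c' = PySem.List.pyIdx? (pvRowLen w r) c
      then some v else pvCell w r' c' := by
  rw [pvCell_eq] at h
  rcases hi : PySem.List.pyIdx? w.length r with _ | i
  · rw [hi] at h; simp at h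
  rw [hi] at h
  simp only [Option.bind_some] at h
  rcases hj : PySem.List.pyIdx? (w.getD i []).length c with _ | j
  · rw [hj] at h; simp at h
  have hilt := pvIdx_lt hi
  have hjlt := pvIdx_lt hj
  have hrlen : pvRowLen w r = (w.getD i []).length := by rw [pvRowLen_eq, hi]
  rw [pvSetCell_eq, hi]
  dsimp only
  rw [hj]
  dsimp only
  rw [hrlen, hj]
  rw [pvCell_eq, pvCell_eq, List.length_set]
  rcases hi' : PySem.List.pyIdx? w.length r' with _ | i'
  · rw [if_neg (by simp)]
    simp
  · simp only [Option.bind_some]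
    have hgd := pvGetD_set w i i' ((w.getD i []).set j v) [] hilt
    by_cases hii : i' = i
    · subst hii
      rw [if_pos rfl] at hgd
      simp only [hgd, List.length_set]
      rcases hj' : PySem.List.pyIdx? (w.getD i' []).length c' with _ | j'
      · rw [if_neg (by simp)]
        simp
      · have hgd2 := pvGetD_set (w.getD i' []) j j' v "" hjlt
        by_cases hjj : j' = j
        · subst hjj
          rw [if_pos (by simp)]
          rw [if_pos rfl] at hgd2
          show some (((w.getD i' []).set j' v).getD j' "") = some v
          rw [hgd2]
        · rw [if_neg (by simp [hjj])]
          rw [if_neg hjj] at hgd2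
          show some (((w.getD i' []).set j v).getD j' "") = some ((w.getD i' []).getD j' "")
          rw [hgd2]
    · rw [if_neg (by simp [hii])]
      rw [if_neg hii] at hgd
      simp only [hgd]
theorem pvCell_isSome_of_shape (w w' : List (List String)) (hl : w'.length = w.length)
    (hr : ∀ r : Int, pvRowLen w' r = pvRowLen w r) (r c : Int) :
    (pvCell w' r c).isSome = (pvCell w r c).isSome := by
  rw [pvCell_eq, pvCell_eq, hl]
  rcases hi : PySem.List.pyIdx? w.length r with _ | i
  · rfl
  · simp only [Option.bind_some]
    have h1 := hr r
    rw [pvRowLen_eq, pvRowLen_eq, hl, hi] at h1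
    dsimp only at h1
    rw [h1]
    rcases hj : PySem.List.pyIdx? (w.getD i []).length c with _ | j <;> simp

theorem pvCell_isSome_pvSetCell (w : List (List String)) (r c : Int) (v : String) (r' c' : Int) :
    (pvCell (pvSetCell w r c v) r' c').isSome = (pvCell w r' c').isSome :=
  pvCell_isSome_of_shape w (pvSetCell w r c v) (length_pvSetCell w r c v)
    (fun r'' => pvRowLen_pvSetCell w r c v r'') r' c'
theorem pvSetCell_collapse (w : List (List String)) (r c : Int) (v : String) (r' c' : Int) (v' : String)
    (h1 : PySem.List.pyIdx? w.length r' = PySem.List.pyIdx? w.length r)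
    (h2 : PySem.List.pyIdx? (pvRowLen w r) c' = PySem.List.pyIdx? (pvRowLen w r) c) :
    pvSetCell (pvSetCell w r c v) r' c' v' = pvSetCell w r' c' v' := by
  rcases hi : PySem.List.pyIdx? w.length r with _ | i
  · have e1 : pvSetCell w r c v = w := by rw [pvSetCell_eq, hi]
    rw [e1]
  · rcases hj : PySem.List.pyIdx? (w.getD i []).length c with _ | j
    · have e1 : pvSetCell w r c v = w := by
        rw [pvSetCell_eq, hi]
        dsimp only
        rw [hj]
      rw [e1]
    · have hilt := pvIdx_lt hi
      have hjlt := pvIdx_lt hj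
      have hrlen : pvRowLen w r = (w.getD i []).length := by rw [pvRowLen_eq, hi]
      rw [hrlen] at h2
      rw [hi] at h1
      rw [hj] at h2
      have e1 : pvSetCell w r c v = w.set i ((w.getD i []).set j v) := by
        rw [pvSetCell_eq, hi]
        dsimp only
        rw [hj]
      have e2 : pvSetCell w r' c' v' = w.set i ((w.getD i []).set j v') := by
        rw [pvSetCell_eq, h1]
        dsimp only
        rw [h2]
      have hgd : (w.set i ((w.getD i []).set j v)).getD i [] = (w.getD i []).set j v := by
        rw [pvGetD_set w i i _ [] hilt, if_pos rfl]
      have e3 : pvSetCell (w.set i ((w.getD i []).set j v)) r' c' v' =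
          (w.set i ((w.getD i []).set j v)).set i (((w.getD i []).set j v).set j v') := by
        rw [pvSetCell_eq]
        rw [List.length_set, h1]
        dsimp only
        simp only [hgd, List.length_set, h2]
      rw [e1, e2, e3, List.set_set, List.set_set]
theorem pvChain_shift (w : List (List String)) (d p : Int × Int) (k : Nat)
    (h : pvChain w d p (k + 1)) (hk : 1 ≤ k) : pvChain w d (pvPos p d 1) k := by
  obtain ⟨h1, h2, h3, h4, h5⟩ := h
  refine ⟨hk, ?_, ?_, ?_, ?_⟩
  · intro j hj hj1
    rw [pvPos_shift]
    exact h2 (j + 1) (by omega) (by omega)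
  · rw [pvPos_shift]; exact h3
  · rw [pvPos_shift]; exact h4
  · rw [pvPos_shift]
    intro hdot
    exact (h2 1 (by omega) (by omega)).1

theorem pvChain_d_ne (w : List (List String)) (d p : Int × Int) (k : Nat)
    (h : pvChain w d p k) (hk : 2 ≤ k) : d ≠ (0, 0) := by
  intro hd
  subst hd
  obtain ⟨h1, h2, h3, h4, h5⟩ := h
  have hb := h2 1 (by omega) (by omega)
  rw [pvPos_zero_dir] at hb
  rw [pvPos_zero_dir] at h4
  rw [h4] at hb
  exact absurd hb.2 (by simp)

-- the forward scan stops exactly at the end of the chain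
theorem pvScanB_chain (d : Int × Int) : ∀ (k : Nat) (fuel : Nat) (w : List (List String)) (p : Int × Int),
    pvChain w d p k → k ≤ fuel →
    pvScanB fuel w d (p.1 + d.1) (p.2 + d.2) = pvPos p d k := by
  intro k
  induction k with
  | zero => intro fuel w p h hf; exact absurd h.1 (by omega)
  | succ k ih =>
    intro fuel w p h hf
    obtain ⟨h1, h2, h3, h4, h5⟩ := h
    cases fuel with
    | zero => omega
    | succ f =>
      cases k with
      | zero =>
        obtain ⟨s, hs⟩ := Option.isSome_iff_exists.mp h3
        rw [hs] at h4
        have hnb : ¬(s = "[" ∨ s = "]") := by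
          simp only [Option.getD_some, pvBoxB, Bool.or_eq_false_iff, beq_eq_false_iff_ne, ne_eq] at h4
          tauto
        have hcell : pvCell w (p.1 + d.1) (p.2 + d.2) = some s := by
          rw [← pvPos_one_fst p d, ← pvPos_one_snd p d]; exact hs
        simp only [pvScanB, hcell]
        rw [if_neg hnb]
        rw [← pvPos_one_fst p d, ← pvPos_one_snd p d]
      | succ k =>
        have hb := h2 1 (by omega) (by omega)
        obtain ⟨s, hs⟩ := Option.isSome_iff_exists.mp hb.1
        have hb2 := hb.2
        rw [hs] at hb2
        have hbox : s = "[" ∨ s = "]" := by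
          simp only [Option.getD_some, pvBoxB, Bool.or_eq_true, beq_iff_eq] at hb2
          exact hb2
        have hcell : pvCell w (p.1 + d.1) (p.2 + d.2) = some s := by
          rw [← pvPos_one_fst p d, ← pvPos_one_snd p d]; exact hs
        have hchain : pvChain w d (pvPos p d 1) (k + 1) :=
          pvChain_shift w d p (k + 1) ⟨by omega, h2, h3, h4, h5⟩ (by omega)
        have hrec := ih f w (pvPos p d 1) hchain (by omega)
        rw [pvPos_one_fst, pvPos_one_snd] at hrec
        rw [pvPos_shift] at hrec
        simp only [pvScanB, hcell]
        rw [if_pos hbox]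
        exact hrec

-- splitting off the last step of the backward shift
theorem pvShiftB_split (d : Int × Int) (hd : d ≠ (0, 0)) :
    ∀ (m fuel fuel' : Nat) (w : List (List String)) (p : Int × Int),
    m + 2 ≤ fuel → m + 1 ≤ fuel' →
    pvShiftB fuel w d (pvPos p d (m + 1)).1 (pvPos p d (m + 1)).2 p.1 p.2 =
      pvSetCell (pvShiftB fuel' w d (pvPos p d (m + 1)).1 (pvPos p d (m + 1)).2 (pvPos p d 1).1 (pvPos p d 1).2)
        (pvPos p d 1).1 (pvPos p d 1).2
        ((pvCell (pvShiftB fuel' w d (pvPos p d (m + 1)).1 (pvPos p d (m + 1)).2 (pvPos p d 1).1 (pvPos p d 1).2) p.1 p.2).getD "") := by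
  intro m
  induction m with
  | zero =>
    intro fuel fuel' w p hf hf'
    match fuel, hf with
    | f + 1, _ =>
    match fuel', hf' with
    | f' + 1, _ =>
    have hne := pvPos_ne' p d 1 (by omega) hd
    simp only [pvShiftB]
    rw [if_neg hne]
    rw [(pvPos_sub p d 0).1, (pvPos_sub p d 0).2, pvPos_zero]
    match f, hf with
    | f2 + 1, _ =>
    simp [pvShiftB]
  | succ m ih =>
    intro fuel fuel' w p hf hf'
    match fuel, hf with
    | f + 1, _ =>
    match fuel', hf' with
    | f' + 1, _ =>
    have hne : ¬((pvPos p d (m + 1 + 1)).1 = p.1 ∧ (pvPos p d (m + 1 + 1)).2 = p.2) :=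
      pvPos_ne' p d (m + 1 + 1) (by omega) hd
    have hne2 : ¬((pvPos p d (m + 1 + 1)).1 = (pvPos p d 1).1 ∧ (pvPos p d (m + 1 + 1)).2 = (pvPos p d 1).2) := by
      have h := pvPos_ne' (pvPos p d 1) d (m + 1) (by omega) hd
      rw [pvPos_shift] at h
      exact h
    simp only [pvShiftB]
    rw [if_neg hne, if_neg hne2]
    rw [(pvPos_sub p d (m + 1)).1, (pvPos_sub p d (m + 1)).2]
    exact ih f f' _ p (by omega) (by omega)
theorem pvShiftB_shape : ∀ (fuel : Nat) (w : List (List String)) (d : Int × Int) (r c pr pc : Int),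
    (pvShiftB fuel w d r c pr pc).length = w.length ∧
    (∀ r' : Int, pvRowLen (pvShiftB fuel w d r c pr pc) r' = pvRowLen w r') := by
  intro fuel
  induction fuel with
  | zero => intro w d r c pr pc; exact ⟨rfl, fun r' => rfl⟩
  | succ f ih =>
    intro w d r c pr pc
    simp only [pvShiftB]
    by_cases h : r = pr ∧ c = pc
    · simp [h]
    · rw [if_neg h]
      obtain ⟨ih1, ih2⟩ := ih (pvSetCell w r c ((pvCell w (r - d.1) (c - d.2)).getD "")) d (r - d.1) (c - d.2) pr pc
      refine ⟨?_, fun r' => ?_⟩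
      · rw [ih1, length_pvSetCell]
      · rw [ih2, pvRowLen_pvSetCell]

-- what B computes on a chain
theorem pvAlt_chain (w : List (List String)) (d p : Int × Int) (k : Nat)
    (h : pvChain w d p k) (hf : k + 2 ≤ pvFuel w) :
    move_box_horizontal_alt w d p =
      (if ((pvCell w (pvPos p d k).1 (pvPos p d k).2).getD "") = "."
       then (pvSetCell (pvShiftB (pvFuel w) w d (pvPos p d k).1 (pvPos p d k).2 p.1 p.2) p.1 p.2 ".", true)
       else (w, false)) := by
  have hscan := pvScanB_chain d k (pvFuel w) w p h (by omega)
  obtain ⟨s, hs⟩ := Option.isSome_iff_exists.mp h.2.2.1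
  simp only [move_box_horizontal_alt]
  rw [hscan, hs]
  by_cases hdot : s = "."
  · simp [hdot]
  · simp [hdot]
theorem pvMbhA_chain (d : Int × Int) (fuelB : Nat) :
    ∀ (k : Nat) (w : List (List String)) (p : Int × Int) (fuelA : Nat),
    pvChain w d p k → 2 * k + 2 ≤ fuelA → k + 2 ≤ fuelB →
    pvMbhA fuelA w d p =
      (if ((pvCell w (pvPos p d k).1 (pvPos p d k).2).getD "") = "."
       then (pvSetCell (pvShiftB fuelB w d (pvPos p d k).1 (pvPos p d k).2 p.1 p.2) p.1 p.2 ".", true)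
       else (w, false)) := by
  intro k
  induction k with
  | zero => intro w p fuelA h hfA hfB; exact absurd h.1 (by omega)
  | succ k ih =>
    intro w p fuelA h hfA hfB
    obtain ⟨h1, h2, h3, h4, h5⟩ := h
    match fuelA, hfA with
    | fA + 1, _ =>
    cases k with
    | zero =>
      obtain ⟨s, hs⟩ := Option.isSome_iff_exists.mp h3
      have hcell : pvCell w (p.1 + d.1) (p.2 + d.2) = some s := by
        rw [← pvPos_one_fst p d, ← pvPos_one_snd p d]; exact hs
      rw [hs] at h4
      simp only [Option.getD_some] at h4
      have hnb : ¬(s = "[" ∨ s = "]") := by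
        simp only [pvBoxB, Bool.or_eq_false_iff, beq_eq_false_iff_ne, ne_eq] at h4
        tauto
      simp only [pvMbhA]
      rw [hcell]
      dsimp only
      rw [if_neg hnb, hs]
      simp only [Option.getD_some]
      by_cases hdot : s = "."
      · subst hdot
        rw [if_pos rfl, if_pos rfl]
        have hp := h5 (by rw [hs]; rfl)
        obtain ⟨bs, hbs⟩ := Option.isSome_iff_exists.mp hp
        rw [hbs]
        dsimp only
        by_cases hzero : d = (0, 0)
        · subst hzero
          match fuelB, hfB with
          | fB + 1, _ =>
          simp only [pvShiftB]
          rw [if_pos ⟨by rw [pvPos_one_fst]; ring, by rw [pvPos_one_snd]; ring⟩]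
          have e0 : p.1 + (0 : Int) = p.1 := by ring
          have e1 : p.2 + (0 : Int) = p.2 := by ring
          simp only [e0, e1]
          rw [pvSetCell_collapse w p.1 p.2 bs p.1 p.2 "." rfl rfl]
        · match fuelB, hfB with
          | fB + 1, _ =>
          simp only [pvShiftB]
          rw [if_neg (pvPos_ne' p d 1 (by omega) hzero)]
          rw [(pvPos_sub p d 0).1, (pvPos_sub p d 0).2, pvPos_zero]
          rw [hbs]
          simp only [Option.getD_some]
          match fB, hfB with
          | fB2 + 1, _ =>
          simp [pvShiftB, pvPos_one_fst, pvPos_one_snd]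
      · rw [if_neg hdot, if_neg hdot]
    | succ k =>
      have hb := h2 1 (by omega) (by omega)
      obtain ⟨s1, hs1⟩ := Option.isSome_iff_exists.mp hb.1
      have hb2 := hb.2
      rw [hs1] at hb2
      simp only [Option.getD_some] at hb2
      have hbox : s1 = "[" ∨ s1 = "]" := by
        simp only [pvBoxB, Bool.or_eq_true, beq_iff_eq] at hb2
        exact hb2
      have hcell : pvCell w (p.1 + d.1) (p.2 + d.2) = some s1 := by
        rw [← pvPos_one_fst p d, ← pvPos_one_snd p d]; exact hs1
      have hd0 : d ≠ (0, 0) := pvChain_d_ne w d p (k + 2) ⟨h1, h2, h3, h4, h5⟩ (by omega)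
      have hchain : pvChain w d (pvPos p d 1) (k + 1) :=
        pvChain_shift w d p (k + 1) ⟨h1, h2, h3, h4, h5⟩ (by omega)
      have hrec := ih w (pvPos p d 1) fA hchain (by omega) (by omega)
      rw [pvPos_shift] at hrec
      have hrec' : pvMbhA fA w d (p.1 + d.1, p.2 + d.2) =
          (if (pvCell w (pvPos p d (k + 1 + 1)).1 (pvPos p d (k + 1 + 1)).2).getD "" = "." then
            (pvSetCell (pvShiftB fuelB w d (pvPos p d (k + 1 + 1)).1 (pvPos p d (k + 1 + 1)).2
              (pvPos p d 1).1 (pvPos p d 1).2) (pvPos p d 1).1 (pvPos p d 1).2 ".", true)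
          else (w, false)) := by
        rw [← pvPos_one p d]
        exact hrec
      simp only [pvMbhA]
      rw [hcell]
      dsimp only
      rw [if_pos hbox, hrec']
      by_cases hdot : (pvCell w (pvPos p d (k + 1 + 1)).1 (pvPos p d (k + 1 + 1)).2).getD "" = "."
      · rw [if_pos hdot, if_pos hdot]
        dsimp only
        obtain ⟨hWl, hWr⟩ := pvShiftB_shape fuelB w d (pvPos p d (k + 1 + 1)).1 (pvPos p d (k + 1 + 1)).2
          (pvPos p d 1).1 (pvPos p d 1).2
        set W := pvShiftB fuelB w d (pvPos p d (k + 1 + 1)).1 (pvPos p d (k + 1 + 1)).2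
          (pvPos p d 1).1 (pvPos p d 1).2 with hW
        have hWnp : (pvCell W (pvPos p d 1).1 (pvPos p d 1).2).isSome = true := by
          rw [pvCell_isSome_of_shape w W hWl hWr]
          rw [pvPos_one_fst, pvPos_one_snd, hcell]
          rfl
        have hw1np : pvCell (pvSetCell W (pvPos p d 1).1 (pvPos p d 1).2 ".") (pvPos p d 1).1 (pvPos p d 1).2 = some "." := by
          rw [pvCell_pvSetCell W _ _ _ _ _ hWnp]
          rw [if_pos ⟨rfl, rfl⟩]
        match fA, hfA with
        | fA2 + 1, _ =>
        simp only [pvMbhA]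
        rw [← pvPos_one_fst p d, ← pvPos_one_snd p d, hw1np]
        dsimp only
        rw [if_neg (show ¬(("." : String) = "[" ∨ ("." : String) = "]") by simp), if_pos rfl]
        have hp : (pvCell w p.1 p.2).isSome = true := h5 hdot
        have hw1p : (pvCell (pvSetCell W (pvPos p d 1).1 (pvPos p d 1).2 ".") p.1 p.2).isSome = true := by
          rw [pvCell_isSome_pvSetCell, pvCell_isSome_of_shape w W hWl hWr]
          exact hp
        obtain ⟨bs, hbs⟩ := Option.isSome_iff_exists.mp hw1p
        rw [hbs]
        dsimp only
        have hsplit := pvShiftB_split d hd0 (k + 1) fuelB fuelB w p (by omega) (by omega)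
        rw [← hW] at hsplit
        rw [hsplit]
        have hcases := pvCell_pvSetCell W (pvPos p d 1).1 (pvPos p d 1).2 "." p.1 p.2 hWnp
        by_cases hal : PySem.List.pyIdx? W.length p.1 = PySem.List.pyIdx? W.length (pvPos p d 1).1 ∧
            PySem.List.pyIdx? (pvRowLen W (pvPos p d 1).1) p.2 = PySem.List.pyIdx? (pvRowLen W (pvPos p d 1).1) (pvPos p d 1).2
        · rw [if_pos hal] at hcases
          rw [hbs] at hcases
          injection hcases with hbs'
          subst hbs'
          rw [pvSetCell_collapse W (pvPos p d 1).1 (pvPos p d 1).2 "." (pvPos p d 1).1 (pvPos p d 1).2 "." rfl rfl]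
          rw [pvSetCell_collapse W (pvPos p d 1).1 (pvPos p d 1).2 "." p.1 p.2 "." hal.1 hal.2]
          rw [pvSetCell_collapse W (pvPos p d 1).1 (pvPos p d 1).2 _ p.1 p.2 "." hal.1 hal.2]
          simp
        · rw [if_neg hal] at hcases
          rw [hbs] at hcases
          rw [pvSetCell_collapse W (pvPos p d 1).1 (pvPos p d 1).2 "." (pvPos p d 1).1 (pvPos p d 1).2 bs rfl rfl]
          rw [← hcases]
          simp only [Option.getD_some]
          simp
      · rw [if_neg hdot, if_neg hdot]
        simp
theorem move_box_horizontal_spec : Claim_equal_move_box_horizontal := by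
  intro ware d p _ hpre
  obtain ⟨k, hk, hchain⟩ := hpre
  rw [Finset.mem_range] at hk
  rw [pvChainB_iff] at hchain
  unfold Spec_move_box_horizontal move_box_horizontal
  rw [pvMbhA_chain d (pvFuel ware) k ware p (pvFuel ware) hchain (by unfold pvFuel; omega) (by unfold pvFuel; omega)]
  rw [pvAlt_chain ware d p k hchain (by unfold pvFuel; omega)]
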